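-- pv_equiv track=rewrite | github.com/HumanMD/Big_pyspark | utils/genericFunctions.py | create_W
-- ===== SOURCE A (Python) =====
-- def create_W(cr, V):
--     W = []
--     for i in range(len(V)):
--         for k in range(i, len(V)):
--             e1 = V[i]
--             e2 = V[k]
--             if (e1[1], e2[1]) in cr:
--                 flag_e1 = True
--                 for s in range(i + 1, k):
--                     e3 = V[s]
--                     if (e1[1], e3[1]) in cr:
--                         flag_e1 = False
--                 flag_e2 = True
--                 for s in range(i + 1, k):
--                     e3 = V[s]
--                     if (e3[1], e2[1]) in cr:
--                         flag_e2 = False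
--                 if flag_e1 or flag_e2:
--                     W.append((e1, e2))
--     return W
-- ===== SOURCE B (Python) =====
-- def create_W(cr, V):
--     crs = set(cr)
--     n = len(V)
--     ys = [v[1] for v in V]
--     # nxt[i]: first index s > i with (ys[i], ys[s]) in cr, else n
--     nxt = []
--     for i in range(n):
--         j = n
--         for s in range(i + 1, n):
--             if j == n and (ys[i], ys[s]) in crs:
--                 j = s
--         nxt.append(j)
--     # prv[k]: last index s < k with (ys[s], ys[k]) in cr, else -1
--     prv = []
--     for k in range(n):
--         j = -1
--         for s in range(k):
--             if (ys[s], ys[k]) in crs: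
--                 j = s
--         prv.append(j)
--     W = []
--     for i in range(n):
--         for k in range(i, n):
--             if (ys[i], ys[k]) in crs and (nxt[i] >= k or prv[k] <= i):
--                 W.append((V[i], V[k]))
--     return W
-- ===== Notes on version B (the rewrite author's own statement) =====
-- stated objective: alternative
-- what changed: Replaces A's per-pair rescans of V (two inner loops per candidate pair, O(n^3) pair work) by two precomputed tables (first cr-partner after i, last cr-partner before k) so the pair loop decides each flag with two table lookups; cr membership goes through a set. Quadratic in len(V) versus A's cubic, but not measurably faster on the timing family (which grows cr, where both are linear).
import Mathlib
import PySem

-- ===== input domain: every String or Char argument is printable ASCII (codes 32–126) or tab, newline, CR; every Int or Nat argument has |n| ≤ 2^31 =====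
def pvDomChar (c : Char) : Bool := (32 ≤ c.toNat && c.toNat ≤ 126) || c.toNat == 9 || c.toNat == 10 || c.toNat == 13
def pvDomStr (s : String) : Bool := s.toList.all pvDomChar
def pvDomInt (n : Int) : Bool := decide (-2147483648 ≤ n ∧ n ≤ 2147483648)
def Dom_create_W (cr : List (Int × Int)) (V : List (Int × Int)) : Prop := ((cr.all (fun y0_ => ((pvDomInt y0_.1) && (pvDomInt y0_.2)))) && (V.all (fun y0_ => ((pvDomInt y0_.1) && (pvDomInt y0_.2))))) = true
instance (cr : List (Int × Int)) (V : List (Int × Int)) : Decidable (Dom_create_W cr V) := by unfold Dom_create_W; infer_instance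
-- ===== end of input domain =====

-- B replaces A's per-pair rescans of V by precomputed first-/last-neighbour tables plus one pair loop (a different algorithm; no measured speed claim).

-- ===== PORT A =====
-- V[i]/V[k]/V[s] are always in range (indices come from range(len(V))), so pyGetD with a dummy default is exact here.
def create_W (cr : List (Int × Int)) (V : List (Int × Int)) : List ((Int × Int) × (Int × Int)) :=
  (PySem.List.pyRange 0 (V.length : Int) 1).foldl (fun W i =>
    (PySem.List.pyRange i (V.length : Int) 1).foldl (fun W k =>
      let e1 := PySem.List.pyGetD V i ((0 : Int), (0 : Int))
      let e2 := PySem.List.pyGetD V k ((0 : Int), (0 : Int))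
      if (e1.2, e2.2) ∈ cr then
        let flag_e1 := (PySem.List.pyRange (i + 1) k 1).foldl (fun f s =>
          let e3 := PySem.List.pyGetD V s ((0 : Int), (0 : Int))
          if (e1.2, e3.2) ∈ cr then false else f) true
        let flag_e2 := (PySem.List.pyRange (i + 1) k 1).foldl (fun f s =>
          let e3 := PySem.List.pyGetD V s ((0 : Int), (0 : Int))
          if (e3.2, e2.2) ∈ cr then false else f) true
        if flag_e1 || flag_e2 then W ++ [(e1, e2)] else W
      else W) W) []

-- ===== PORT B =====
def create_W_alt (cr : List (Int × Int)) (V : List (Int × Int)) : List ((Int × Int) × (Int × Int)) :=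
  let crs := PySem.Set.ofList cr
  let n : Int := (V.length : Int)
  let ys := V.map (fun v => v.2)
  -- nxt[i]: first index s > i with (ys[i], ys[s]) in crs, else n
  let nxt := (PySem.List.pyRange 0 n 1).foldl (fun nxt i =>
    nxt ++ [(PySem.List.pyRange (i + 1) n 1).foldl (fun j s =>
      if j = n ∧ (PySem.List.pyGetD ys i 0, PySem.List.pyGetD ys s 0) ∈ crs then s else j) n]) []
  -- prv[k]: last index s < k with (ys[s], ys[k]) in crs, else -1
  let prv := (PySem.List.pyRange 0 n 1).foldl (fun prv k =>
    prv ++ [(PySem.List.pyRange 0 k 1).foldl (fun j s =>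
      if (PySem.List.pyGetD ys s 0, PySem.List.pyGetD ys k 0) ∈ crs then s else j) (-1)]) []
  (PySem.List.pyRange 0 n 1).foldl (fun W i =>
    (PySem.List.pyRange i n 1).foldl (fun W k =>
      if (PySem.List.pyGetD ys i 0, PySem.List.pyGetD ys k 0) ∈ crs ∧
          (PySem.List.pyGetD nxt i 0 ≥ k ∨ PySem.List.pyGetD prv k 0 ≤ i) then
        W ++ [(PySem.List.pyGetD V i ((0 : Int), (0 : Int)), PySem.List.pyGetD V k ((0 : Int), (0 : Int)))]
      else W) W) []

-- ===== PRECONDITION & SPEC =====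
def Spec_create_W (cr : List (Int × Int)) (V : List (Int × Int)) (out : List ((Int × Int) × (Int × Int))) : Prop := out = create_W_alt cr V
instance (cr : List (Int × Int)) (V : List (Int × Int)) (out : List ((Int × Int) × (Int × Int))) : Decidable (Spec_create_W cr V out) := by unfold Spec_create_W; infer_instance

-- ===== CLAIM (what is proved, stated in full; the proofs are below) =====
def Claim_equal_create_W : Prop := ∀ (cr : List (Int × Int)) (V : List (Int × Int)), Dom_create_W cr V → Spec_create_W cr V (create_W cr V)

-- ===== LEMMAS AND PROOFS =====

-- A's per-pair flag loop is `true` iff no element of the range satisfies p.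
lemma pv_foldl_flag (p : Int → Prop) [DecidablePred p] (l : List Int) (b : Bool) :
    l.foldl (fun f s => if p s then false else f) b = (b && !(l.any (fun s => decide (p s)))) := by
  induction l generalizing b with
  | nil => simp
  | cons x t ih =>
    rw [List.foldl_cons]
    by_cases h : p x
    · rw [if_pos h, ih]
      simp [h]
    · rw [if_neg h, ih]
      simp [h]

-- once the first-find accumulator has left the sentinel it never changes
lemma pv_foldl_keep (p : Int → Prop) [DecidablePred p] (n : Int) (l : List Int) (j : Int)
    (hj : j ≠ n) :
    l.foldl (fun j s => if j = n ∧ p s then s else j) j = j := by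
  induction l with
  | nil => rfl
  | cons x t ih =>
    rw [List.foldl_cons, if_neg (fun h => hj h.1)]
    exact ih

-- characterisation of B's first-find scan
lemma pv_firstFind (p : Int → Prop) [DecidablePred p] (n : Int) (m : Nat) :
    ∀ a : Int, a + (m : Int) ≤ n →
    ((PySem.List.pyRange a (a + (m : Int)) 1).foldl
        (fun j s => if j = n ∧ p s then s else j) n = n ∧
      ∀ s, a ≤ s → s < a + (m : Int) → ¬ p s) ∨
    (∃ j, (PySem.List.pyRange a (a + (m : Int)) 1).foldl
        (fun j s => if j = n ∧ p s then s else j) n = j ∧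
      a ≤ j ∧ j < a + (m : Int) ∧ p j ∧ ∀ s, a ≤ s → s < j → ¬ p s) := by
  induction m with
  | zero =>
    intro a _
    left
    rw [PySem.List.pyRange_one_eq_nil (by omega)]
    exact ⟨rfl, fun s h1 h2 => absurd h2 (by omega)⟩
  | succ m ih =>
    intro a ha
    have hcons : PySem.List.pyRange a (a + ((m : Nat) + 1 : Nat)) 1
        = a :: PySem.List.pyRange (a + 1) (a + ((m : Nat) + 1 : Nat)) 1 :=
      PySem.List.pyRange_one_cons (by push_cast; omega)
    rw [hcons, List.foldl_cons]
    by_cases hpa : p a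
    · rw [if_pos ⟨rfl, hpa⟩, pv_foldl_keep p n _ a (by push_cast at ha ⊢; omega)]
      right
      exact ⟨a, rfl, le_refl a, by push_cast; omega, hpa, fun s h1 h2 => absurd h2 (by omega)⟩
    · rw [if_neg (fun h => hpa h.2)]
      have hrng : a + ((m : Nat) + 1 : Nat) = (a + 1) + (m : Int) := by push_cast; omega
      rw [hrng]
      rcases ih (a + 1) (by push_cast at ha; omega) with ⟨hj, hnone⟩ | ⟨j, hj, h1, h2, h3, h4⟩
      · left
        refine ⟨hj, fun s h1 h2 => ?_⟩
        rcases eq_or_lt_of_le h1 with h | h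
        · exact h ▸ hpa
        · exact hnone s (by omega) h2
      · right
        refine ⟨j, hj, by omega, h2, h3, fun s hs1 hs2 => ?_⟩
        rcases eq_or_lt_of_le hs1 with h | h
        · exact h ▸ hpa
        · exact h4 s (by omega) hs2

-- characterisation of B's last-find scan
lemma pv_lastFind (p : Int → Prop) [DecidablePred p] (m : Nat) :
    ((PySem.List.pyRange 0 (m : Int) 1).foldl (fun j s => if p s then s else j) (-1) = -1 ∧
      ∀ s, 0 ≤ s → s < (m : Int) → ¬ p s) ∨
    (∃ j, (PySem.List.pyRange 0 (m : Int) 1).foldl (fun j s => if p s then s else j) (-1) = j ∧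
      0 ≤ j ∧ j < (m : Int) ∧ p j ∧ ∀ s, j < s → s < (m : Int) → ¬ p s) := by
  induction m with
  | zero =>
    left
    rw [PySem.List.pyRange_one_eq_nil (by omega)]
    exact ⟨rfl, fun s h1 h2 => absurd h2 (by omega)⟩
  | succ m ih =>
    have hsplit : PySem.List.pyRange 0 ((m : Nat) + 1 : Nat) 1
        = PySem.List.pyRange 0 (m : Int) 1 ++ [(m : Int)] := by
      have : ((m : Nat) + 1 : Nat) = ((m : Int) + 1) := by push_cast; ring
      rw [this]
      exact PySem.List.pyRange_one_succ_right (by omega)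
    rw [hsplit, List.foldl_append, List.foldl_cons, List.foldl_nil]
    by_cases hpm : p (m : Int)
    · rw [if_pos hpm]
      right
      exact ⟨(m : Int), rfl, by omega, by push_cast; omega, hpm,
        fun s h1 h2 => absurd h2 (by push_cast; omega)⟩
    · rw [if_neg hpm]
      rcases ih with ⟨hj, hnone⟩ | ⟨j, hj, h1, h2, h3, h4⟩
      · left
        refine ⟨hj, fun s h1 h2 => ?_⟩
        have h2' : s < (m : Int) ∨ s = (m : Int) := by push_cast at h2; omega
        rcases h2' with h | h
        · exact hnone s h1 h
        · exact h ▸ hpm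
      · right
        refine ⟨j, hj, h1, by push_cast; omega, h3, fun s hs1 hs2 => ?_⟩
        have h2' : s < (m : Int) ∨ s = (m : Int) := by push_cast at hs2; omega
        rcases h2' with h | h
        · exact h4 s hs1 h
        · exact h ▸ hpm

-- A's flag_e1 loop computes exactly "k ≤ nxt[i]"
lemma pv_flag_first (p : Int → Prop) [DecidablePred p] (n i k : Int)
    (hik : i ≤ k) (hk : k < n) :
    ((PySem.List.pyRange (i + 1) k 1).foldl (fun f s => if p s then false else f) true : Bool)
      = decide (k ≤ (PySem.List.pyRange (i + 1) n 1).foldl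
          (fun j s => if j = n ∧ p s then s else j) n) := by
  have hm : (i + 1) + (((n - (i + 1)).toNat : Nat) : Int) = n := by omega
  have h := pv_firstFind p n (n - (i + 1)).toNat (i + 1) (by omega)
  rw [hm] at h
  rw [pv_foldl_flag]
  rcases h with ⟨hj, hnone⟩ | ⟨j, hj, h1, h2, h3, h4⟩
  · rw [hj, decide_eq_true (by omega : k ≤ n), Bool.true_and]
    simp only [Bool.not_eq_eq_eq_not, Bool.not_true, List.any_eq_false]
    intro x hx
    rw [PySem.List.mem_pyRange_one] at hx
    simpa using hnone x (by omega) (by omega)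
  · rw [hj]
    by_cases hkj : k ≤ j
    · rw [decide_eq_true hkj, Bool.true_and]
      simp only [Bool.not_eq_eq_eq_not, Bool.not_true, List.any_eq_false]
      intro x hx
      rw [PySem.List.mem_pyRange_one] at hx
      simpa using h4 x (by omega) (by omega)
    · rw [decide_eq_false hkj, Bool.true_and, Bool.not_eq_false', List.any_eq_true]
      exact ⟨j, by rw [PySem.List.mem_pyRange_one]; omega, by simpa using h3⟩

-- A's flag_e2 loop computes exactly "prv[k] ≤ i"
lemma pv_flag_last (p : Int → Prop) [DecidablePred p] (i k : Int)
    (h0 : 0 ≤ i) (hik : i ≤ k) :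
    ((PySem.List.pyRange (i + 1) k 1).foldl (fun f s => if p s then false else f) true : Bool)
      = decide ((PySem.List.pyRange 0 k 1).foldl (fun j s => if p s then s else j) (-1) ≤ i) := by
  have hk0 : ((k.toNat : Nat) : Int) = k := by omega
  have h := pv_lastFind p k.toNat
  rw [hk0] at h
  rw [pv_foldl_flag]
  rcases h with ⟨hj, hnone⟩ | ⟨j, hj, h1, h2, h3, h4⟩
  · rw [hj, decide_eq_true (by omega : (-1 : Int) ≤ i), Bool.true_and]
    simp only [Bool.not_eq_eq_eq_not, Bool.not_true, List.any_eq_false]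
    intro x hx
    rw [PySem.List.mem_pyRange_one] at hx
    simpa using hnone x (by omega) (by omega)
  · rw [hj]
    by_cases hji : j ≤ i
    · rw [decide_eq_true hji, Bool.true_and]
      simp only [Bool.not_eq_eq_eq_not, Bool.not_true, List.any_eq_false]
      intro x hx
      rw [PySem.List.mem_pyRange_one] at hx
      simpa using h4 x (by omega) (by omega)
    · rw [decide_eq_false hji, Bool.true_and, Bool.not_eq_false', List.any_eq_true]
      exact ⟨j, by rw [PySem.List.mem_pyRange_one]; omega, by simpa using h3⟩

-- ys[s] is (V[s]).2
lemma pv_ys (V : List (Int × Int)) (s : Int) :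
    PySem.List.pyGetD (V.map (fun v => v.2)) s 0
      = (PySem.List.pyGetD V s ((0 : Int), (0 : Int))).2 := by
  simpa using PySem.List.pyGetD_map (fun v => v.2) V s ((0 : Int), (0 : Int))

-- a table built by repeated append, looked up inside its range
lemma pv_table (g : Int → Int) (n i : Int) (h0 : 0 ≤ i) (hn : i < n) :
    PySem.List.pyGetD ((PySem.List.pyRange 0 n 1).foldl (fun acc x => acc ++ [g x]) []) i 0
      = g i := by
  rw [PySem.List.foldl_append_singleton_eq_map, List.nil_append,
    PySem.List.pyGetD_map_pyRange_of_nonneg g n i 0 h0 hn]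

-- assembling A's nested ifs against B's single condition
lemma pv_ifassemble {α : Type} (P b1 b2 : Prop) [Decidable P] [Decidable b1] [Decidable b2]
    (X acc : α) :
    (if P then (if (decide b1 || decide b2) = true then X else acc) else acc)
      = if P ∧ (b1 ∨ b2) then X else acc := by
  by_cases hP : P <;> by_cases h1 : b1 <;> by_cases h2 : b2 <;> simp [hP, h1, h2]

-- ===== VERDICT (by name: the statement is the Claim_ definition above) =====
theorem create_W_spec : Claim_equal_create_W := by
  intro cr V _
  unfold Spec_create_W create_W create_W_alt
  apply PySem.List.foldl_congr_mem
  intro acc0 i hi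
  rw [PySem.List.mem_pyRange_one] at hi
  apply PySem.List.foldl_congr_mem
  intro acc k hk
  rw [PySem.List.mem_pyRange_one] at hk
  simp only [pv_ys, PySem.Set.mem_ofList]
  simp only [pv_table _ (V.length : Int) i hi.1 hi.2,
    pv_table _ (V.length : Int) k (by omega : (0:Int) ≤ k) hk.2]
  rw [pv_flag_first (fun s => ((PySem.List.pyGetD V i ((0 : Int), (0 : Int))).2,
        (PySem.List.pyGetD V s ((0 : Int), (0 : Int))).2) ∈ cr) (V.length : Int) i k hk.1 hk.2,
    pv_flag_last (fun s => ((PySem.List.pyGetD V s ((0 : Int), (0 : Int))).2,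
        (PySem.List.pyGetD V k ((0 : Int), (0 : Int))).2) ∈ cr) i k hi.1 hk.1]
  exact pv_ifassemble _ _ _ _ _
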